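-- pv_equiv track=rewrite | github.com/cheng-wei-huang0612/Inverse_25519_jumpdivstep | Archive/dec2uint256.py | dec_to_uint256_t
-- ===== SOURCE A (Python) =====
-- def dec_to_uint256_t(x_dec: str) -> str:
--     """
--     將十進位大整數 (x_dec) 轉換為 C 語言的 uint256_t 結構初始值。
--     limb64[0] 存最低 64 bits，limb64[3] 存最高 64 bits。
--     """
--     x = int(x_dec, 10)   # 以十進位解析輸入字串
--     limbs = []
--
--     # 逐段擷取 64-bit (小端序)
--     for _ in range(4):
--         limb = x & ((1 << 64) - 1)  # 取最低 64 bits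
--         limbs.append(limb)
--         x >>= 64                   # 右移 64 bits
--
--     # 生成 C 程式碼片段
--     lines = []
--     lines.append("uint256_t val = {")
--     lines.append("    .limb64 = {")
--     for i, limb in enumerate(limbs):
--         # 以 16 進位格式 (補足 16 位十六進位數) + "ULL" 結尾
--         line = f"        0x{limb:016x}ULL"
--         if i < 3:
--             line += ","
--         lines.append(line)
--     lines.append("    }")
--     lines.append("};")
--
--     return "\n".join(lines)
-- ===== SOURCE B (Python) =====
-- def dec_to_uint256_t(x_dec: str) -> str:
--     x = int(x_dec, 10)
--     h = format(x & ((1 << 256) - 1), '064x')  # low 256 bits, big-endian hex, width 64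
--     lines = ["uint256_t val = {", "    .limb64 = {"]
--     for i in range(4):
--         chunk = h[16 * (3 - i): 16 * (4 - i)]  # limb i = chunk 3-i (little-endian struct)
--         lines.append("        0x" + chunk + "ULL" + ("," if i < 3 else ""))
--     lines.append("    }")
--     lines.append("};")
--     return "\n".join(lines)
-- ===== Notes on version B (the rewrite author's own statement) =====
-- stated objective: alternative
-- what changed: B replaces A's four-iteration mask-and-shift limb loop by rendering x & (2^256-1) once as a fixed-width 64-digit hex string and slicing it into four 16-character big-endian chunks emitted in reverse order; Pre_ excludes only the strings on which int(x_dec, 10) raises ValueError.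
import Mathlib
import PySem

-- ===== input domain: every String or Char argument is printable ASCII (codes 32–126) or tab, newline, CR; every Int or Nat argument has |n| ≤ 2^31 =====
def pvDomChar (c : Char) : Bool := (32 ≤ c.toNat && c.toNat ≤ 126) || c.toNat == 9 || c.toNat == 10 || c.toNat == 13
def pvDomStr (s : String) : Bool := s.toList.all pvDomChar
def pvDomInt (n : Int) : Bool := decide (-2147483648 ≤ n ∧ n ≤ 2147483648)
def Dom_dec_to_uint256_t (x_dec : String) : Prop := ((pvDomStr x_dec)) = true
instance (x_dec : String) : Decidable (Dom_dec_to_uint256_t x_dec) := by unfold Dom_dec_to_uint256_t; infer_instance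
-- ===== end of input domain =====

-- B renders the low 256 bits once as a single 64-digit hex string and slices it into the four
-- limbs, instead of A's mask/shift loop over 64-bit limbs; same output, similar cost (alternative).

-- Fixed-width zero-padded lowercase hex rendering: exact port of Python's format(n, '0<w>x')
-- (and of the f-string field {n:0<w>x}) for 0 ≤ n < 16^w, the only way both Pythons use it.
def hexPad : Nat → Nat → List Char
  | 0, _ => []
  | w + 1, m => hexPad w (m / 16) ++ [Nat.digitChar (m % 16)]

-- ===== PORT A =====
def dec_to_uint256_t (x_dec : String) : String :=
  match PySem.Int.ofStrBase? x_dec 10 with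
  | none => ""   -- int(x_dec, 10) raises ValueError here; excluded by Pre_
  | some x0 =>
    -- for _ in range(4): limb = x & ((1 << 64) - 1); limbs.append(limb); x >>= 64
    let st := (List.range 4).foldl
      (fun (st : Int × List Int) _ =>
        let limb := PySem.Int.band st.1 ((1 : Int) <<< (64 : Nat) - 1)
        (st.1 >>> (64 : Nat), st.2 ++ [limb])) (x0, [])
    let limbs := st.2
    let lines := ["uint256_t val = {".toList, "    .limb64 = {".toList]
    -- for i, limb in enumerate(limbs): "        0x{limb:016x}ULL" (+ "," if i < 3)
    let lines := lines ++ (PySem.List.enumerate limbs).map (fun p =>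
      let line := "        0x".toList ++ hexPad 16 p.2.toNat ++ "ULL".toList
      if p.1 < 3 then line ++ [','] else line)
    let lines := lines ++ ["    }".toList, "};".toList]
    String.ofList (List.intercalate ['\n'] lines)   -- "\n".join(lines)

-- ===== PORT B =====
def dec_to_uint256_t_alt (x_dec : String) : String :=
  match PySem.Int.ofStrBase? x_dec 10 with
  | none => ""   -- int(x_dec, 10) raises ValueError here; excluded by Pre_
  | some x =>
    -- h = format(x & ((1 << 256) - 1), '064x')
    let h := hexPad 64 (PySem.Int.band x ((1 : Int) <<< (256 : Nat) - 1)).toNat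
    let lines := ["uint256_t val = {".toList, "    .limb64 = {".toList]
      ++ (List.range 4).map (fun i =>
        -- chunk = h[16*(3-i) : 16*(4-i)]  (a non-negative in-range slice = drop/take)
        let chunk := (h.drop (16 * (3 - i))).take 16
        "        0x".toList ++ chunk ++ "ULL".toList ++ (if i < 3 then [','] else []))
      ++ ["    }".toList, "};".toList]
    String.ofList (List.intercalate ['\n'] lines)   -- "\n".join(lines)

-- ===== PRECONDITION & SPEC =====
-- Pre_ excludes exactly the strings that are not valid base-10 int literals, on which
-- Python's int(x_dec, 10) raises ValueError in both A and B.
def Pre_dec_to_uint256_t (x_dec : String) : Prop :=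
  (PySem.Int.ofStrBase? x_dec 10).isSome = true
instance (x_dec : String) : Decidable (Pre_dec_to_uint256_t x_dec) := by
  unfold Pre_dec_to_uint256_t; infer_instance

def pvWitness_dec_to_uint256_t : String := "123"

def Spec_dec_to_uint256_t (x_dec : String) (out : String) : Prop := out = dec_to_uint256_t_alt x_dec
instance (x_dec : String) (out : String) : Decidable (Spec_dec_to_uint256_t x_dec out) := by unfold Spec_dec_to_uint256_t; infer_instance

-- ===== CLAIM (what is proved, stated in full; the proofs are below) =====
def Claim_equal_dec_to_uint256_t : Prop := ∀ (x_dec : String), Dom_dec_to_uint256_t x_dec → Pre_dec_to_uint256_t x_dec → Spec_dec_to_uint256_t x_dec (dec_to_uint256_t x_dec)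

-- ===== LEMMAS AND PROOFS =====

theorem hexPad_length (w m : Nat) : (hexPad w m).length = w := by
  induction w generalizing m with
  | zero => simp [hexPad]
  | succ w ih => simp [hexPad, ih]

theorem hexPad_split (a b m : Nat) :
    hexPad (a + b) m = hexPad a (m / 16 ^ b) ++ hexPad b (m % 16 ^ b) := by
  induction b generalizing m with
  | zero => simp [hexPad]
  | succ b ih =>
    have h1 : m / 16 / 16 ^ b = m / 16 ^ (b + 1) := by
      rw [Nat.div_div_eq_div_mul, pow_succ, mul_comm]
    have h2 : m % 16 ^ (b + 1) / 16 = m / 16 % 16 ^ b := by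
      rw [pow_succ, mul_comm]; exact Nat.mod_mul_right_div_self m 16 (16 ^ b)
    have h3 : m % 16 ^ (b + 1) % 16 = m % 16 :=
      Nat.mod_mod_of_dvd m (dvd_pow_self 16 (Nat.succ_ne_zero b))
    show hexPad (a + b + 1) m = _
    rw [show a + b + 1 = (a + b) + 1 from rfl]
    simp only [hexPad, ih, h1, h2, h3, List.append_assoc]

-- Python's  x & ((1 << k) - 1)  is  x mod 2^k  (Euclidean, for every integer x).
theorem band_two_pow_sub_one (x : Int) (k : Nat) :
    PySem.Int.band x (2 ^ k - 1) = x % 2 ^ k := by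
  have hk1 : (1 : Nat) ≤ 2 ^ k := Nat.one_le_two_pow
  have hmask : (2 ^ k - 1 : Int) = ((2 ^ k - 1 : Nat) : Int) := by
    push_cast [Nat.cast_sub hk1]; ring
  by_cases hx : 0 ≤ x
  · rw [hmask, PySem.Int.band_of_nonneg hx (by positivity)]
    rw [Int.toNat_natCast, Nat.and_two_pow_sub_one_eq_mod]
    conv_rhs => rw [← Int.toNat_of_nonneg hx]
    push_cast
    rfl
  · have h1I : (1 : Int) ≤ 2 ^ k := by exact_mod_cast hk1
    have h0 : (0 : Int) ≤ -x - 1 := by omega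
    simp only [PySem.Int.band]
    rw [if_neg hx, if_pos (by linarith : (0 : Int) ≤ 2 ^ k - 1)]
    have htn : (2 ^ k - 1 : Int).toNat = 2 ^ k - 1 := by rw [hmask, Int.toNat_natCast]
    rw [htn, Nat.and_comm, Nat.and_two_pow_sub_one_eq_mod]
    set n := (-x - 1).toNat with hn
    have hnc : ((n : Int)) = -x - 1 := Int.toNat_of_nonneg h0
    set r := n % 2 ^ k with hrdef
    set q := n / 2 ^ k with hqdef
    have hq : 2 ^ k * q + r = n := Nat.div_add_mod n (2 ^ k)
    have hrK : r < 2 ^ k := Nat.mod_lt _ (Nat.two_pow_pos k)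
    have hnI : (n : Int) = 2 ^ k * q + r := by exact_mod_cast hq.symm
    have hrI : (r : Int) < 2 ^ k := by exact_mod_cast hrK
    have hcast : ((2 ^ k - 1 - r : Nat) : Int) = 2 ^ k - 1 - r := by
      have e1 : (2 ^ k - 1 - r : Nat) = 2 ^ k - (1 + r) := by omega
      have hle : 1 + r ≤ 2 ^ k := by omega
      rw [e1, Nat.cast_sub hle]; push_cast; ring
    rw [hcast]
    have hxe : x = (2 ^ k - 1 - (r : Int)) + 2 ^ k * (-(q : Int) - 1) := by
      have hx' : x = -(n : Int) - 1 := by omega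
      rw [hx', hnI]; ring
    rw [hxe, Int.add_mul_emod_self_left,
      Int.emod_eq_of_lt (by linarith) (by linarith)]

-- Dropping high bits above a+b before shifting by a and masking to b bits changes nothing.
theorem emod_ediv_emod (x : Int) (a b n : Nat) (h : a + b ≤ n) :
    x % 2 ^ n / 2 ^ a % 2 ^ b = x / 2 ^ a % 2 ^ b := by
  have hsplit : (2 ^ n : Int) = 2 ^ a * (2 ^ b * 2 ^ (n - a - b)) := by
    rw [← pow_add, ← pow_add]; congr 1; omega
  have hx : x % 2 ^ n = x + 2 ^ a * (2 ^ b * (2 ^ (n - a - b) * (-(x / 2 ^ n)))) := by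
    rw [Int.emod_def, hsplit]; ring
  rw [hx, Int.add_mul_ediv_left _ _ (by positivity : (2 ^ a : Int) ≠ 0),
    Int.add_mul_emod_self_left]

-- the four limbs of A are the four 16-digit chunks of B's 64-digit rendering
theorem limb_chunk (x0 : Int) (a : Nat) (ha : a + 64 ≤ 256) :
    (PySem.Int.band (x0 / 2 ^ a) ((1 : Int) <<< (64 : Nat) - 1)).toNat
      = (PySem.Int.band x0 ((1 : Int) <<< (256 : Nat) - 1)).toNat / 2 ^ a % 2 ^ 64 := by
  have hm64 : ((1 : Int) <<< (64 : Nat) - 1) = 2 ^ (64 : Nat) - 1 := by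
    norm_num [Int.shiftLeft_eq]
  have hm256 : ((1 : Int) <<< (256 : Nat) - 1) = 2 ^ (256 : Nat) - 1 := by
    norm_num [Int.shiftLeft_eq]
  rw [hm64, hm256, band_two_pow_sub_one, band_two_pow_sub_one,
    ← emod_ediv_emod x0 a 64 256 (by omega)]
  set r := x0 % 2 ^ 256 with hr
  have hr0 : 0 ≤ r := Int.emod_nonneg x0 (by positivity)
  rw [← Int.toNat_of_nonneg hr0]
  generalize r.toNat = R
  have e1 : ((R : Int)) / 2 ^ a = ((R / 2 ^ a : Nat) : Int) := by
    rw [← PySem.Int.floordiv_eq_ediv_of_pos (by positivity : (0 : Int) < 2 ^ a)]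
    exact_mod_cast PySem.Int.floordiv_natCast R (2 ^ a)
  rw [e1]
  have e2 : ((R / 2 ^ a : Nat) : Int) % 2 ^ 64 = ((R / 2 ^ a % 2 ^ 64 : Nat) : Int) := by
    rw [← PySem.Int.mod_eq_emod_of_pos (by positivity : (0 : Int) < 2 ^ 64)]
    exact_mod_cast PySem.Int.mod_natCast (R / 2 ^ a) (2 ^ 64)
  rw [e2, Int.toNat_natCast]
  simp

-- B's 64-digit rendering decomposes into the four 16-digit limb renderings (big-endian)
theorem hexPad64_decomp (X : Nat) (hX : X < 2 ^ 256) :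
    hexPad 64 X =
      hexPad 16 (X / 2 ^ 192 % 2 ^ 64) ++ (hexPad 16 (X / 2 ^ 128 % 2 ^ 64) ++
        (hexPad 16 (X / 2 ^ 64 % 2 ^ 64) ++ hexPad 16 (X % 2 ^ 64))) := by
  have h1 : hexPad 64 X = hexPad 16 (X / 16 ^ 48) ++ hexPad 48 (X % 16 ^ 48) :=
    hexPad_split 16 48 X
  have h2 := hexPad_split 16 32 (X % 16 ^ 48)
  have h3 := hexPad_split 16 16 (X % 16 ^ 48 % 16 ^ 32)
  have e0 : X % 16 ^ 48 % 16 ^ 32 % 16 ^ 16 = X % 16 ^ 16 := by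
    rw [Nat.mod_mod_of_dvd _ (pow_dvd_pow 16 (by norm_num)),
      Nat.mod_mod_of_dvd _ (pow_dvd_pow 16 (by norm_num))]
  have e1 : X % 16 ^ 48 % 16 ^ 32 / 16 ^ 16 = X / 16 ^ 16 % 16 ^ 16 := by
    rw [Nat.mod_mod_of_dvd _ (pow_dvd_pow 16 (by norm_num)),
      show (16 : Nat) ^ 32 = 16 ^ 16 * 16 ^ 16 by norm_num]
    exact Nat.mod_mul_right_div_self X (16 ^ 16) (16 ^ 16)
  have e2 : X % 16 ^ 48 / 16 ^ 32 = X / 16 ^ 32 % 16 ^ 16 := by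
    rw [show (16 : Nat) ^ 48 = 16 ^ 32 * 16 ^ 16 by norm_num]
    exact Nat.mod_mul_right_div_self X (16 ^ 32) (16 ^ 16)
  have e3 : X / 16 ^ 48 = X / 16 ^ 48 % 16 ^ 16 := by
    have hlt : X / 16 ^ 48 < 16 ^ 16 := by
      apply Nat.div_lt_of_lt_mul
      calc X < 2 ^ 256 := hX
        _ = 16 ^ 48 * 16 ^ 16 := by norm_num
    exact (Nat.mod_eq_of_lt hlt).symm
  rw [h1, h2, h3, e0, e1, e2]
  rw [show hexPad 16 (X / 16 ^ 48) = hexPad 16 (X / 16 ^ 48 % 16 ^ 16) from by rw [← e3]]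
  norm_num

theorem dec_to_uint256_t_spec : Claim_equal_dec_to_uint256_t := by
  intro x_dec _hD hPre
  unfold Spec_dec_to_uint256_t
  unfold Pre_dec_to_uint256_t at hPre
  cases h : PySem.Int.ofStrBase? x_dec 10 with
  | none => rw [h] at hPre; simp at hPre
  | some x0 =>
    unfold dec_to_uint256_t dec_to_uint256_t_alt
    rw [h]
    set X := (PySem.Int.band x0 ((1 : Int) <<< (256 : Nat) - 1)).toNat with hXdef
    have hm256 : ((1 : Int) <<< (256 : Nat) - 1) = 2 ^ (256 : Nat) - 1 := by
      norm_num [Int.shiftLeft_eq]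
    have hXlt : X < 2 ^ 256 := by
      rw [hXdef, hm256, band_two_pow_sub_one]
      have hlt := Int.emod_lt_of_pos x0 (show (0 : Int) < 2 ^ 256 by positivity)
      have hnn := Int.emod_nonneg x0 (show (2 : Int) ^ 256 ≠ 0 by positivity)
      norm_num at hlt hnn ⊢
      omega
    -- the four limbs of A as chunks of X
    have h0 : (PySem.Int.band x0 ((1 : Int) <<< (64 : Nat) - 1)).toNat = X % 2 ^ 64 := by
      have := limb_chunk x0 0 (by norm_num)
      simpa using this
    have e64 : x0 >>> (64 : Nat) = x0 / 2 ^ 64 := by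
      rw [Int.shiftRight_eq_div_pow]; norm_cast
    have e128 : (x0 >>> (64 : Nat)) >>> (64 : Nat) = x0 / 2 ^ 128 := by
      rw [e64, Int.shiftRight_eq_div_pow]
      rw [Int.ediv_ediv_of_nonneg (by positivity)]
      norm_num
    have e192 : ((x0 >>> (64 : Nat)) >>> (64 : Nat)) >>> (64 : Nat) = x0 / 2 ^ 192 := by
      rw [e128, Int.shiftRight_eq_div_pow]
      rw [Int.ediv_ediv_of_nonneg (by positivity)]
      norm_num
    have h1 : (PySem.Int.band (x0 >>> (64 : Nat)) ((1 : Int) <<< (64 : Nat) - 1)).toNat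
        = X / 2 ^ 64 % 2 ^ 64 := by
      rw [e64]; exact limb_chunk x0 64 (by norm_num)
    have h2 : (PySem.Int.band ((x0 >>> (64 : Nat)) >>> (64 : Nat)) ((1 : Int) <<< (64 : Nat) - 1)).toNat
        = X / 2 ^ 128 % 2 ^ 64 := by
      rw [e128]; exact limb_chunk x0 128 (by norm_num)
    have h3 : (PySem.Int.band (((x0 >>> (64 : Nat)) >>> (64 : Nat)) >>> (64 : Nat)) ((1 : Int) <<< (64 : Nat) - 1)).toNat
        = X / 2 ^ 192 % 2 ^ 64 := by
      rw [e192]; exact limb_chunk x0 192 (by norm_num)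
    -- the four chunks of B's hex string
    have hdec := hexPad64_decomp X hXlt
    have s3 : (hexPad 64 X).take 16 = hexPad 16 (X / 2 ^ 192 % 2 ^ 64) := by
      rw [hdec]
      exact List.take_left' (hexPad_length _ _)
    have s2 : ((hexPad 64 X).drop 16).take 16 = hexPad 16 (X / 2 ^ 128 % 2 ^ 64) := by
      rw [hdec, List.drop_left' (hexPad_length _ _)]
      exact List.take_left' (hexPad_length _ _)
    have s1 : ((hexPad 64 X).drop 32).take 16 = hexPad 16 (X / 2 ^ 64 % 2 ^ 64) := by
      rw [hdec, ← List.append_assoc,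
        List.drop_left' (by simp [hexPad_length] : (hexPad 16 (X / 2 ^ 192 % 2 ^ 64) ++ hexPad 16 (X / 2 ^ 128 % 2 ^ 64)).length = 32)]
      exact List.take_left' (hexPad_length _ _)
    have s0 : ((hexPad 64 X).drop 48).take 16 = hexPad 16 (X % 2 ^ 64) := by
      rw [hdec, ← List.append_assoc, ← List.append_assoc,
        List.drop_left' (by simp [hexPad_length] : ((hexPad 16 (X / 2 ^ 192 % 2 ^ 64) ++ hexPad 16 (X / 2 ^ 128 % 2 ^ 64)) ++ hexPad 16 (X / 2 ^ 64 % 2 ^ 64)).length = 48)]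
      exact List.take_of_length_le (by simp [hexPad_length])
    simp only [List.range_succ, List.range_zero, List.foldl_cons,
      List.foldl_nil, List.map_cons, List.map_nil,
      PySem.List.enumerate_cons, PySem.List.enumerate_nil,
      List.nil_append, List.cons_append]
    rw [← hXdef]
    norm_num [h0, h1, h2, h3, s0, s1, s2, s3]
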